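-- pv_equiv track=rewrite | github.com/KenMercusLai/codewars | 3. Huffman Encoding/solution.py | group_cells
-- ===== SOURCE A (Python) =====
-- def group_cells(field):
--     ret = []
--     for i in range(len(field)):
--         for j in range(len(field[i])):
--             if field[i][j] == 1:
--                 for group_index in range(len(ret)):
--                     if ((i + 1, j) in ret[group_index] or
--                             (i - 1, j) in ret[group_index] or
--                             (i, j + 1) in ret[group_index] or
--                             (i, j - 1) in ret[group_index]):
--                         ret[group_index].append((i, j))
--                         break
--                 else:
--                     ret.append([(i, j)])
--     return ret
-- ===== SOURCE B (Python) =====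
-- def group_cells(field):
--     groups = []
--     owner = {}  # cell -> index of the group it was placed in
--     for i, row in enumerate(field):
--         for j, v in enumerate(row):
--             if v == 1:
--                 cands = []
--                 if (i - 1, j) in owner:
--                     cands.append(owner[(i - 1, j)])
--                 if (i, j - 1) in owner:
--                     cands.append(owner[(i, j - 1)])
--                 if cands:
--                     g = min(cands)
--                     groups[g].append((i, j))
--                     owner[(i, j)] = g
--                 else:
--                     owner[(i, j)] = len(groups)
--                     groups.append([(i, j)])
--     return groups
-- ===== Notes on version B (the rewrite author's own statement) =====
-- stated objective: alternative
-- what changed: B replaces A's per-cell rescan of every existing group (membership tests over whole groups) by a cell-to-group-index dictionary: for each 1-cell it looks up only the up and left neighbours and places the cell into the group with the smaller index, which equals A's first-matching group.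
import Mathlib
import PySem

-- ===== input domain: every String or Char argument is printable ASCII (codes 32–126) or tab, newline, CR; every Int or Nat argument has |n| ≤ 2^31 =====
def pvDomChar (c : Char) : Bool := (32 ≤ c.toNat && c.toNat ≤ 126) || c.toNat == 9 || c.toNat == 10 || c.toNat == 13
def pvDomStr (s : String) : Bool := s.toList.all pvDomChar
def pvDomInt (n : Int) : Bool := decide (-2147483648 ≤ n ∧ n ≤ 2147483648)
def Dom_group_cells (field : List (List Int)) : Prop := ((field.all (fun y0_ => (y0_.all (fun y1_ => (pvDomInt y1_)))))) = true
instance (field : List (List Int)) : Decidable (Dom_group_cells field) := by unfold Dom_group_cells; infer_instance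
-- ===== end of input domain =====

-- B replaces A's rescan of every existing group per 1-cell by a cell→group-index
-- dictionary (only the up/left neighbours can already be grouped; the first matching
-- group index is their minimum): constant dictionary work per 1-cell instead of
-- membership tests over all groups.

-- ===== PORT A =====
-- inner 'for group_index in range(len(ret)) … break / else' loop of A:
-- walk the groups in order, append (i, j) to the first group containing a neighbour,
-- else append a fresh singleton group at the end
def aAdd (i j : Int) (ret : List (List (Int × Int))) : List (List (Int × Int)) :=
  match ret with
  | [] => [[(i, j)]]
  | grp :: rest =>
    if (i + 1, j) ∈ grp ∨ (i - 1, j) ∈ grp ∨ (i, j + 1) ∈ grp ∨ (i, j - 1) ∈ grp then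
      (grp ++ [(i, j)]) :: rest
    else
      grp :: aAdd i j rest

def group_cells (field : List (List Int)) : List (List (Int × Int)) :=
  (PySem.List.enumerate field 0).foldl
    (fun ret p =>
      (PySem.List.enumerate p.2 0).foldl
        (fun ret q => if q.2 = 1 then aAdd p.1 q.1 ret else ret) ret)
    []

-- ===== PORT B =====
-- one 1-cell of Source B: look up the up/left neighbours in the owner dict, put the cell
-- into the group with the smaller index, else open a new group
def bCell (i j : Int) (st : List (List (Int × Int)) × PySem.Dict (Int × Int) Int) :
    List (List (Int × Int)) × PySem.Dict (Int × Int) Int :=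
  let groups := st.1
  let owner := st.2
  let cands : List Int :=
    (if owner.contains (i - 1, j) then [owner.getD (i - 1, j) 0] else []) ++
    (if owner.contains (i, j - 1) then [owner.getD (i, j - 1) 0] else [])
  match cands with
  | [] => (groups ++ [[(i, j)]], owner.insert (i, j) (groups.length : Int))
  | c :: cs =>
    let g := cs.foldl min c          -- min(cands); g ≥ 0 always (it is a stored index)
    (groups.modify g.toNat (· ++ [(i, j)]), owner.insert (i, j) g)

def group_cells_alt (field : List (List Int)) : List (List (Int × Int)) :=
  ((PySem.List.enumerate field 0).foldl
    (fun st p =>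
      (PySem.List.enumerate p.2 0).foldl
        (fun st q => if q.2 = 1 then bCell p.1 q.1 st else st) st)
    ([], PySem.Dict.empty)).1

-- ===== PRECONDITION & SPEC =====
def Spec_group_cells (field : List (List Int)) (out : List (List (Int × Int))) : Prop := out = group_cells_alt field
instance (field : List (List Int)) (out : List (List (Int × Int))) : Decidable (Spec_group_cells field out) := by unfold Spec_group_cells; infer_instance

-- ===== CLAIM (what is proved, stated in full; the proofs are below) =====
def Claim_equal_group_cells : Prop := ∀ (field : List (List Int)), Dom_group_cells field → Spec_group_cells field (group_cells field)

-- ===== LEMMAS AND PROOFS =====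

-- row-major order on cell positions
def pLt (a b : Int × Int) : Prop := a.1 < b.1 ∨ (a.1 = b.1 ∧ a.2 < b.2)

-- the flattened row-major stream of (position, value) cells, rows numbered from s
def cellsFrom (rows : List (List Int)) (s : Int) : List ((Int × Int) × Int) :=
  (PySem.List.enumerate rows s).flatMap
    (fun p => (PySem.List.enumerate p.2 0).map (fun q => ((p.1, q.1), q.2)))

def stepA (ret : List (List (Int × Int))) (t : (Int × Int) × Int) : List (List (Int × Int)) :=
  if t.2 = 1 then aAdd t.1.1 t.1.2 ret else ret

def stepB (st : List (List (Int × Int)) × PySem.Dict (Int × Int) Int)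
    (t : (Int × Int) × Int) : List (List (Int × Int)) × PySem.Dict (Int × Int) Int :=
  if t.2 = 1 then bCell t.1.1 t.1.2 st else st

-- the loop invariant tying A's group list to B's (groups, owner) state
def ABInv (ret : List (List (Int × Int))) (owner : PySem.Dict (Int × Int) Int) : Prop :=
  (∀ c g, owner.get? c = some g →
      0 ≤ g ∧ ∃ h : g.toNat < ret.length, c ∈ ret[g.toNat]) ∧
  (∀ (g : Nat) (h : g < ret.length), ∀ c ∈ ret[g], owner.get? c = some (g : Int))

lemma cellsFrom_cons (r : List Int) (rows : List (List Int)) (s : Int) :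
    cellsFrom (r :: rows) s =
      (PySem.List.enumerate r 0).map (fun q => ((s, q.1), q.2)) ++ cellsFrom rows (s + 1) := by
  simp [cellsFrom, PySem.List.enumerate_cons]

lemma mem_cellsFrom_fst_ge (rows : List (List Int)) (s : Int) :
    ∀ x ∈ cellsFrom rows s, s ≤ x.1.1 := by
  induction rows generalizing s with
  | nil => simp [cellsFrom]
  | cons r rows ih =>
    intro x hx
    rw [cellsFrom_cons] at hx
    rcases List.mem_append.1 hx with h | h
    · rcases List.mem_map.1 h with ⟨q, _, rfl⟩; simp
    · have := ih (s + 1) x h; omega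

lemma pairwise_cellsFrom (rows : List (List Int)) (s : Int) :
    (cellsFrom rows s).Pairwise (fun a b => pLt a.1 b.1) := by
  induction rows generalizing s with
  | nil => simp [cellsFrom]
  | cons r rows ih =>
    rw [cellsFrom_cons, List.pairwise_append]
    refine ⟨?_, ih (s + 1), ?_⟩
    · exact (PySem.List.pairwise_lt_enumerate r 0).map _
        (fun a b h => Or.inr ⟨rfl, h⟩)
    · intro a ha b hb
      rcases List.mem_map.1 ha with ⟨q, _, rfl⟩
      have := mem_cellsFrom_fst_ge rows (s + 1) b hb
      exact Or.inl (by simpa using by omega)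

lemma group_cells_eq_foldA (field : List (List Int)) :
    group_cells field = (cellsFrom field 0).foldl stepA [] := by
  simp [group_cells, cellsFrom, stepA, List.foldl_flatMap, List.foldl_map]

lemma group_cells_alt_eq_foldB (field : List (List Int)) :
    group_cells_alt field = ((cellsFrom field 0).foldl stepB ([], PySem.Dict.empty)).1 := by
  simp [group_cells_alt, cellsFrom, stepB, List.foldl_flatMap, List.foldl_map]

-- A's inner loop when no group contains any neighbour: append a fresh group
lemma aAdd_no_match (i j : Int) (ret : List (List (Int × Int)))
    (h : ∀ grp ∈ ret, (i + 1, j) ∉ grp ∧ (i - 1, j) ∉ grp ∧ (i, j + 1) ∉ grp ∧ (i, j - 1) ∉ grp) :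
    aAdd i j ret = ret ++ [[(i, j)]] := by
  induction ret with
  | nil => simp [aAdd]
  | cons grp rest ih =>
    have hg := h grp (by simp)
    rw [aAdd]
    rw [if_neg (by tauto)]
    simp [ih (fun g hgm => h g (by simp [hgm]))]

-- A's inner loop when m is the first index whose group contains a neighbour
lemma aAdd_match (i j : Int) (ret : List (List (Int × Int))) (m : Nat) (hm : m < ret.length)
    (hbefore : ∀ k (hk : k < ret.length), k < m →
      (i + 1, j) ∉ ret[k] ∧ (i - 1, j) ∉ ret[k] ∧ (i, j + 1) ∉ ret[k] ∧ (i, j - 1) ∉ ret[k])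
    (hat : (i + 1, j) ∈ ret[m] ∨ (i - 1, j) ∈ ret[m] ∨ (i, j + 1) ∈ ret[m] ∨ (i, j - 1) ∈ ret[m]) :
    aAdd i j ret = ret.set m (ret[m] ++ [(i, j)]) := by
  induction ret generalizing m with
  | nil => simp at hm
  | cons grp rest ih =>
    match m with
    | 0 =>
      rw [aAdd, if_pos (by simpa using hat)]
      simp
    | m + 1 =>
      have h0 := hbefore 0 (by simp) (by omega)
      rw [aAdd, if_neg (by simpa using (by tauto : ¬((i + 1, j) ∈ grp ∨ (i - 1, j) ∈ grp ∨ (i, j + 1) ∈ grp ∨ (i, j - 1) ∈ grp)))]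
      have := ih m (by simpa using hm)
        (fun k hk hkm => by simpa using hbefore (k + 1) (by simpa using hk) (by omega))
        (by simpa using hat)
      simp [this]


lemma getElem_idx_eq {α : Type} (l : List α) {m n : Nat} (h : m = n)
    (hm : m < l.length) (hn : n < l.length) : l[m] = l[n] := by subst h; rfl

-- A's inner loop, characterised through the minimal matching group index, when only
-- the up/left neighbours can occur in a group
lemma aAdd_eq_set_min (i j gmin : Int) (ret : List (List (Int × Int)))
    (owner : PySem.Dict (Int × Int) Int)
    (h2 : ∀ (g : Nat) (hg : g < ret.length), ∀ c ∈ ret[g], owner.get? c = some (g : Int))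
    (hDown : owner.contains (i + 1, j) = false)
    (hRight : owner.contains (i, j + 1) = false)
    (_h0 : 0 ≤ gmin) (hlt : gmin.toNat < ret.length)
    (hat : (i - 1, j) ∈ ret[gmin.toNat] ∨ (i, j - 1) ∈ ret[gmin.toNat])
    (hmin : ∀ (k : Nat) (hk : k < ret.length), (k : Int) < gmin →
      (i - 1, j) ∉ ret[k] ∧ (i, j - 1) ∉ ret[k]) :
    aAdd i j ret = ret.set gmin.toNat (ret[gmin.toNat] ++ [(i, j)]) := by
  have noMem : ∀ n : Int × Int, owner.contains n = false →
      ∀ (g : Nat) (hg : g < ret.length), n ∉ ret[g] := by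
    intro n hn g hg hmem
    rw [PySem.Dict.contains_eq_isSome_get?, h2 g hg n hmem] at hn
    simp at hn
  apply aAdd_match
  · intro k hk hkm
    have hki : (k : Int) < gmin := by omega
    exact ⟨noMem _ hDown k hk, (hmin k hk hki).1, noMem _ hRight k hk, (hmin k hk hki).2⟩
  · tauto

-- the invariant survives placing (i, j) into group gmin on both sides
lemma ABInv_insert_set (i j gmin : Int) (ret : List (List (Int × Int)))
    (owner : PySem.Dict (Int × Int) Int)
    (hInv : ABInv ret owner)
    (hSelf : owner.contains (i, j) = false)
    (h0 : 0 ≤ gmin) (hlt : gmin.toNat < ret.length) :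
    ABInv (ret.set gmin.toNat (ret[gmin.toNat] ++ [(i, j)])) (owner.insert (i, j) gmin) := by
  obtain ⟨h1, h2⟩ := hInv
  have hSelfMem : ∀ (g : Nat) (hg : g < ret.length), (i, j) ∉ ret[g] := by
    intro g hg hmem
    rw [PySem.Dict.contains_eq_isSome_get?, h2 g hg _ hmem] at hSelf
    simp at hSelf
  constructor
  · intro c g hg
    rw [PySem.Dict.get?_insert] at hg
    split_ifs at hg with hc
    · subst hc
      obtain rfl : gmin = g := by simpa using hg
      refine ⟨h0, by simpa using hlt, ?_⟩
      rw [List.getElem_set, if_pos rfl]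
      simp
    · obtain ⟨h0', hlt', hm⟩ := h1 c g hg
      refine ⟨h0', by simpa using hlt', ?_⟩
      rw [List.getElem_set]
      split_ifs with he
      · refine List.mem_append_left _ ?_
        rw [getElem_idx_eq ret he hlt (by omega)]
        exact hm
      · exact hm
  · intro g hg c hc
    have hg' : g < ret.length := by simpa using hg
    rw [List.getElem_set] at hc
    split_ifs at hc with he
    · rcases List.mem_append.1 hc with hcm | hcm
      · have hne : c ≠ (i, j) := fun hceq => hSelfMem _ hlt (by rw [← hceq]; exact hcm)
        rw [PySem.Dict.get?_insert, if_neg hne, h2 _ hlt c hcm, he]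
      · obtain rfl : c = (i, j) := by simpa using hcm
        rw [PySem.Dict.get?_insert, if_pos rfl]
        have : gmin = (g : Int) := by omega
        rw [this]
    · have hne : c ≠ (i, j) := fun hceq => hSelfMem g hg' (by rw [← hceq]; exact hc)
      rw [PySem.Dict.get?_insert, if_neg hne, h2 g hg' c hc]

-- the main simultaneous induction: under the invariant and row-major ordering of the
-- remaining cells, A's fold and the first component of B's fold agree
lemma main_lemma :
    ∀ (L : List ((Int × Int) × Int)) (ret : List (List (Int × Int)))
      (owner : PySem.Dict (Int × Int) Int),
      ABInv ret owner →
      (∀ c, owner.contains c = true → ∀ t ∈ L, pLt c t.1) →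
      L.Pairwise (fun a b => pLt a.1 b.1) →
      L.foldl stepA ret = (L.foldl stepB (ret, owner)).1 := by
  intro L
  induction L with
  | nil => intros; rfl
  | cons t L ih =>
    intro ret owner hInv hFresh hPw
    obtain ⟨⟨i, j⟩, v⟩ := t
    obtain ⟨h1, h2⟩ := hInv
    rw [List.foldl_cons, List.foldl_cons]
    by_cases hv : v = 1
    · -- a 1-cell is placed
      -- positions at or after (i, j) in row-major order are not yet owned
      have hAfter : ∀ n : Int × Int, ¬ pLt n (i, j) → owner.contains n = false := by
        intro n hn
        by_contra hc
        exact hn (hFresh n (by simpa using hc) ((i, j), v) (by simp))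
      have hSelf : owner.contains (i, j) = false := hAfter _ (by simp [pLt])
      have hDown : owner.contains (i + 1, j) = false := by
        apply hAfter; simp [pLt]
      have hRight : owner.contains (i, j + 1) = false := by
        apply hAfter; simp [pLt]
      -- an unowned cell is in no group
      have noMem : ∀ n : Int × Int, owner.contains n = false →
          ∀ (g : Nat) (hg : g < ret.length), n ∉ ret[g] := by
        intro n hn g hg hmem
        have := h2 g hg n hmem
        rw [PySem.Dict.contains_eq_isSome_get?, this] at hn
        simp at hn
      -- get? from contains
      have getOf : ∀ n : Int × Int, owner.contains n = true →
          ∃ a, owner.get? n = some a := by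
        intro n hn
        rw [PySem.Dict.contains_eq_isSome_get?] at hn
        exact Option.isSome_iff_exists.1 hn
      have hFresh' : ∀ (gNew : Int),
          (∀ c, (owner.insert (i, j) gNew).contains c = true → ∀ t' ∈ L, pLt c t'.1) := by
        intro gNew c hc t' ht'
        rw [PySem.Dict.contains_insert] at hc
        rcases Bool.or_eq_true_iff.1 hc with h | h
        · have : c = (i, j) := by simpa using h
          subst this
          exact (List.pairwise_cons.1 hPw).1 t' ht'
        · exact hFresh c h t' (by simp [ht'])
      simp only [stepA, stepB, if_pos hv]
      rcases hUb : owner.contains (i - 1, j) with _ | _ <;>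
        rcases hLb : owner.contains (i, j - 1) with _ | _
      · -- no candidate: both ports open a new group
        have hA : aAdd i j ret = ret ++ [[(i, j)]] := by
          apply aAdd_no_match
          intro grp hgrp
          obtain ⟨g, hg, rfl⟩ := List.mem_iff_getElem.1 hgrp
          exact ⟨noMem _ hDown g hg, noMem _ hUb g hg, noMem _ hRight g hg, noMem _ hLb g hg⟩
        have hB : bCell i j (ret, owner) =
            (ret ++ [[(i, j)]], owner.insert (i, j) (ret.length : Int)) := by
          simp [bCell, hUb, hLb]
        rw [hA, hB]
        apply ih
        · constructor
          · intro c g hg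
            rw [PySem.Dict.get?_insert] at hg
            split_ifs at hg with hc
            · subst hc
              obtain rfl : (ret.length : Int) = g := by simpa using hg
              refine ⟨by positivity, by simp, ?_⟩
              simp
            · obtain ⟨h0, hlt, hm⟩ := h1 c g hg
              refine ⟨h0, by simp; omega, ?_⟩
              rwa [List.getElem_append_left hlt]
          · intro g hg c hc
            simp only [List.length_append, List.length_cons, List.length_nil] at hg
            rcases Nat.lt_or_ge g ret.length with hlt | hge
            · rw [List.getElem_append_left hlt] at hc
              have := h2 g hlt c hc
              rw [PySem.Dict.get?_insert, if_neg, this]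
              intro hceq
              exact noMem _ hSelf g hlt (hceq ▸ hc)
            · have hgeq : g = ret.length := by omega
              subst hgeq
              simp at hc
              subst hc
              rw [PySem.Dict.get?_insert, if_pos rfl]
        · exact hFresh' _
        · exact (List.pairwise_cons.1 hPw).2
      · -- only the left neighbour is owned
        obtain ⟨b, hb⟩ := getOf _ hLb
        obtain ⟨hb0, hblt, hbm⟩ := h1 _ b hb
        have hgdb : owner.getD (i, j - 1) 0 = b := by
          rw [PySem.Dict.getD_eq_get?_getD, hb]; rfl
        have hB : bCell i j (ret, owner) =
            (ret.modify b.toNat (· ++ [(i, j)]), owner.insert (i, j) b) := by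
          simp [bCell, hUb, hLb, hgdb]
        have hmin : ∀ (k : Nat) (hk : k < ret.length), (k : Int) < b →
            (i - 1, j) ∉ ret[k] ∧ (i, j - 1) ∉ ret[k] := by
          intro k hk hkb
          refine ⟨noMem _ hUb k hk, fun hmem => ?_⟩
          have := h2 k hk _ hmem
          rw [this] at hb
          obtain rfl : (k : Int) = b := by simpa using hb
          omega
        have hA : aAdd i j ret = ret.set b.toNat (ret[b.toNat] ++ [(i, j)]) :=
          aAdd_eq_set_min i j b ret owner h2 hDown hRight hb0 hblt (Or.inr hbm) hmin
        rw [hA, hB, List.modify_eq_set,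
          List.getElem?_eq_getElem hblt, Option.getD_some]
        exact ih _ _ (ABInv_insert_set i j b ret owner ⟨h1, h2⟩ hSelf hb0 hblt)
          (hFresh' b) (List.pairwise_cons.1 hPw).2
      · -- only the up neighbour is owned
        obtain ⟨a, ha⟩ := getOf _ hUb
        obtain ⟨ha0, halt, ham⟩ := h1 _ a ha
        have hgda : owner.getD (i - 1, j) 0 = a := by
          rw [PySem.Dict.getD_eq_get?_getD, ha]; rfl
        have hB : bCell i j (ret, owner) =
            (ret.modify a.toNat (· ++ [(i, j)]), owner.insert (i, j) a) := by
          simp [bCell, hUb, hLb, hgda]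
        have hmin : ∀ (k : Nat) (hk : k < ret.length), (k : Int) < a →
            (i - 1, j) ∉ ret[k] ∧ (i, j - 1) ∉ ret[k] := by
          intro k hk hka
          refine ⟨fun hmem => ?_, noMem _ hLb k hk⟩
          have := h2 k hk _ hmem
          rw [this] at ha
          obtain rfl : (k : Int) = a := by simpa using ha
          omega
        have hA : aAdd i j ret = ret.set a.toNat (ret[a.toNat] ++ [(i, j)]) :=
          aAdd_eq_set_min i j a ret owner h2 hDown hRight ha0 halt (Or.inl ham) hmin
        rw [hA, hB, List.modify_eq_set,
          List.getElem?_eq_getElem halt, Option.getD_some]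
        exact ih _ _ (ABInv_insert_set i j a ret owner ⟨h1, h2⟩ hSelf ha0 halt)
          (hFresh' a) (List.pairwise_cons.1 hPw).2
      · -- both neighbours are owned: the smaller group index wins
        obtain ⟨a, ha⟩ := getOf _ hUb
        obtain ⟨b, hb⟩ := getOf _ hLb
        obtain ⟨ha0, halt, ham⟩ := h1 _ a ha
        obtain ⟨hb0, hblt, hbm⟩ := h1 _ b hb
        have hgda : owner.getD (i - 1, j) 0 = a := by
          rw [PySem.Dict.getD_eq_get?_getD, ha]; rfl
        have hgdb : owner.getD (i, j - 1) 0 = b := by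
          rw [PySem.Dict.getD_eq_get?_getD, hb]; rfl
        have hB : bCell i j (ret, owner) =
            (ret.modify (min a b).toNat (· ++ [(i, j)]), owner.insert (i, j) (min a b)) := by
          simp [bCell, hUb, hLb, hgda, hgdb]
        have hm0 : 0 ≤ min a b := le_min ha0 hb0
        have hmlt : (min a b).toNat < ret.length := by
          rcases min_le_iff.1 (le_refl (min a b)) with h | h <;> omega
        have hmin : ∀ (k : Nat) (hk : k < ret.length), (k : Int) < min a b →
            (i - 1, j) ∉ ret[k] ∧ (i, j - 1) ∉ ret[k] := by
          intro k hk hkm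
          constructor
          · intro hmem
            have := h2 k hk _ hmem
            rw [this] at ha
            obtain rfl : (k : Int) = a := by simpa using ha
            have := min_le_left (k : Int) b
            omega
          · intro hmem
            have := h2 k hk _ hmem
            rw [this] at hb
            obtain rfl : (k : Int) = b := by simpa using hb
            have := min_le_right a (k : Int)
            omega
        have hat : (i - 1, j) ∈ ret[(min a b).toNat] ∨ (i, j - 1) ∈ ret[(min a b).toNat] := by
          rcases le_total a b with hab | hab
          · left
            rw [getElem_idx_eq ret (show (min a b).toNat = a.toNat by rw [min_eq_left hab])
              hmlt halt]
            exact ham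
          · right
            rw [getElem_idx_eq ret (show (min a b).toNat = b.toNat by rw [min_eq_right hab])
              hmlt hblt]
            exact hbm
        have hA : aAdd i j ret = ret.set (min a b).toNat (ret[(min a b).toNat] ++ [(i, j)]) :=
          aAdd_eq_set_min i j (min a b) ret owner h2 hDown hRight hm0 hmlt hat hmin
        rw [hA, hB, List.modify_eq_set,
          List.getElem?_eq_getElem hmlt, Option.getD_some]
        exact ih _ _ (ABInv_insert_set i j (min a b) ret owner ⟨h1, h2⟩ hSelf hm0 hmlt)
          (hFresh' (min a b)) (List.pairwise_cons.1 hPw).2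
    · -- not a 1-cell: state unchanged
      simp only [stepA, stepB, if_neg hv]
      exact ih ret owner ⟨h1, h2⟩ (fun c hc t' ht' => hFresh c hc t' (by simp [ht']))
        (List.pairwise_cons.1 hPw).2

-- ===== VERDICT (by name: the statement is the Claim_ definition above) =====
theorem group_cells_spec : Claim_equal_group_cells := by
  intro field _
  unfold Spec_group_cells
  rw [group_cells_eq_foldA, group_cells_alt_eq_foldB]
  refine main_lemma _ [] PySem.Dict.empty ⟨?_, ?_⟩ ?_ (pairwise_cellsFrom field 0)
  · intro c g h; simp [PySem.Dict.get?_empty] at h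
  · intro g h; simp at h
  · intro c hc; simp [PySem.Dict.contains_empty] at hc
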